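-- pv_equiv track=rewrite | github.com/jun23ird/contrail_detector | utils.py | thicken
-- ===== SOURCE A (Python) =====
-- from collections import deque
--
-- def thicken(mask, boundary, thickness = 5) :
--   m = len(mask)
--   n = len(mask[0])
--   curr_thickness = 0
--   thickened_mask = mask.copy()
--   in_queue = boundary.copy()
--   q = deque(boundary)
--
--   while q and curr_thickness < thickness :
--     q_length = len(q)
--     for _ in range(q_length) :
--       k,l = q.popleft()
--       thickened_mask[k][l] = 1
--       for a,b in [(1,0),(-1,0),(0,1),(0,-1),(1,1),(1,-1),(-1,1),(-1,-1)] :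
--           if 0<= k+a<m and 0<=l+b<n :
--             if thickened_mask[k+a][l+b] == 0 and (k+a,l+b) not in in_queue:
--               q.append((k+a,l+b))
--               in_queue.add((k+a,l+b))
--     curr_thickness +=1
--   return thickened_mask
-- ===== SOURCE B (Python) =====
-- def thicken(mask, boundary, thickness=5):
--   # Morphological dilation: synchronous whole-grid cellular-automaton updates
--   # (with a fixpoint break) instead of a frontier/queue BFS.  A mutates the
--   # input's inner rows in place; B returns fresh rows — the claimed
--   # equivalence is about the return value.
--   m = len(mask)
--   n = len(mask[0])
--   R = [[False] * n for _ in range(m)]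
--   if thickness > 0 and boundary:
--     for k, l in boundary:
--       R[k][l] = True
--     for _ in range(thickness - 1):
--       new = [[R[i][j] or (mask[i][j] == 0 and any(
--                 R[i + a][j + b]
--                 for a in (-1, 0, 1) for b in (-1, 0, 1)
--                 if 0 <= i + a < m and 0 <= j + b < n))
--               for j in range(n)] for i in range(m)]
--       if new == R:
--         break
--       R = new
--   return [[1 if j < n and R[i][j] else x for j, x in enumerate(row)]
--           for i, row in enumerate(mask)]
-- ===== Notes on version B (the rewrite author's own statement) =====
-- stated objective: alternative
-- what changed: A runs a frontier BFS (deque + level-size counting + an in_queue set) that mutates the grid as it goes and reads the partially-updated mask; B computes the marked cells by morphological dilation - a boolean grid updated by synchronous whole-grid cellular-automaton steps (new[i][j] = R[i][j] or (mask[i][j]==0 and any 8-neighbour set)) with a fixpoint break, then rebuilds the output in one pass (A mutates the input's inner rows in place, B leaves the input untouched; the equivalence proved is about the return value).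
-- outside the precondition, e.g. on thicken([[0, 0, 1]], {(0, -2)}, 3): A returns [[0, 1, 1]], B returns [[1, 1, 1]]
import Mathlib
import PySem

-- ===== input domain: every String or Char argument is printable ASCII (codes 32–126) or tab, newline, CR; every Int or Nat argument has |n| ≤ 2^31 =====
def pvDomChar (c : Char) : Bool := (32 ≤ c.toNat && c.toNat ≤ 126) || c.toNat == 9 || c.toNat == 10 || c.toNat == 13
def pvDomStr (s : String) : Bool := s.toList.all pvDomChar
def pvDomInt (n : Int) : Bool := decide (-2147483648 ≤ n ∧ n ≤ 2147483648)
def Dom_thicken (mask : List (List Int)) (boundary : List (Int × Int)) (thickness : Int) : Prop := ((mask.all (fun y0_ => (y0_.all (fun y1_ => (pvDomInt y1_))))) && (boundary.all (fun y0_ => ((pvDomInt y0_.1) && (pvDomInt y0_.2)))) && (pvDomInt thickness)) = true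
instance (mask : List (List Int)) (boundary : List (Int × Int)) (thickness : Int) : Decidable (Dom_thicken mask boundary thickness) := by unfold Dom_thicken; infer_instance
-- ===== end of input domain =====

-- B replaces A's frontier BFS (deque + level counting on a grid it mutates as it reads it) by
-- morphological dilation: synchronous whole-grid cellular-automaton updates with a fixpoint break,
-- then one rebuild pass. A mutates the input's inner rows in place, B does not; the equivalence
-- proved is about the return value.

-- ===== PORT A =====
-- the 8 neighbour offsets, in A's order
def pvDirs : List (Int × Int) := [(1,0),(-1,0),(0,1),(0,-1),(1,1),(1,-1),(-1,1),(-1,-1)]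

-- thickened_mask[k][l] (read); Python raises IndexError out of range — Pre_ keeps reads in range
def pvGetCell (tm : List (List Int)) (k l : Int) : Int :=
  PySem.List.pyGetD (PySem.List.pyGetD tm k []) l 0

-- thickened_mask[k][l] = 1 (write); Python wraps a negative / raises on an out-of-range index —
-- Pre_ keeps every written cell at 0 ≤ k < len(tm), 0 ≤ l < len(tm[k]), where this is exact
def pvSetCell (tm : List (List Int)) (k l : Int) : List (List Int) :=
  tm.mapIdx (fun i row =>
    if (i : Int) = k then row.mapIdx (fun j x => if (j : Int) = l then (1 : Int) else x) else row)

-- the inner `for a,b in [...]` neighbour scan of one popped cell (k,l); state (q, in_queue)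
def pvScanA (m n : Int) (tm : List (List Int)) (k l : Int)
    (st : List (Int × Int) × List (Int × Int)) : List (Int × Int) × List (Int × Int) :=
  pvDirs.foldl (fun st ab =>
    if 0 ≤ k + ab.1 ∧ k + ab.1 < m ∧ 0 ≤ l + ab.2 ∧ l + ab.2 < n then
      if pvGetCell tm (k + ab.1) (l + ab.2) = 0 ∧ (k + ab.1, l + ab.2) ∉ st.2 then
        (st.1 ++ [(k + ab.1, l + ab.2)], PySem.Set.add st.2 (k + ab.1, l + ab.2))
      else st
    else st) st

-- `for _ in range(q_length): k,l = q.popleft(); ...` — one while-iteration (one BFS level)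
def pvRoundA (m n : Int) : Nat → List (List Int) × List (Int × Int) × List (Int × Int) →
    List (List Int) × List (Int × Int) × List (Int × Int)
  | 0, st => st
  | c + 1, (tm, q, inq) =>
    match q with
    | [] => (tm, [], inq)      -- unreachable: the counter never exceeds the queue length
    | (k, l) :: qs =>
      let tm' := pvSetCell tm k l
      let st' := pvScanA m n tm' k l (qs, inq)
      pvRoundA m n c (tm', st'.1, st'.2)

-- `while q and curr_thickness < thickness:` — at most thickness.toNat iterations
def pvLoopA (m n : Int) : Nat → List (List Int) × List (Int × Int) × List (Int × Int) → List (List Int)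
  | 0, st => st.1
  | f + 1, (tm, q, inq) => if q = [] then tm else pvLoopA m n f (pvRoundA m n q.length (tm, q, inq))

def thicken (mask : List (List Int)) (boundary : List (Int × Int)) (thickness : Int) : List (List Int) :=
  let m : Int := mask.length
  let n : Int := ((PySem.List.pyGetD mask 0 []).length : Int)   -- len(mask[0]); raises on [] — Pre_ excludes
  -- thickened_mask = mask.copy() (shallow), in_queue = boundary.copy(), q = deque(boundary)
  pvLoopA m n thickness.toNat (mask, boundary, boundary)

-- ===== PORT B =====
-- R[i][j] read (nonnegative, in-range wherever B reads)
def pvGetB (R : List (List Bool)) (i j : Int) : Bool :=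
  (R.getD i.toNat []).getD j.toNat false

-- R[k][l] = True
def pvSetB (R : List (List Bool)) (k l : Int) : List (List Bool) :=
  R.mapIdx (fun i row => if (i : Int) = k then row.mapIdx (fun j x => if (j : Int) = l then true else x) else row)

-- [[False]*n for _ in range(m)]
def pvZeros (m n : Int) : List (List Bool) :=
  (PySem.List.pyRange 0 m 1).map (fun _ => (PySem.List.pyRange 0 n 1).map (fun _ => false))

-- any(R[i+a][j+b] for a in (-1,0,1) for b in (-1,0,1) if 0<=i+a<m and 0<=j+b<n)
def pvNbr (R : List (List Bool)) (m n i j : Int) : Bool :=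
  [(-1 : Int), 0, 1].any (fun a => [(-1 : Int), 0, 1].any (fun b =>
    decide (0 ≤ i + a ∧ i + a < m ∧ 0 ≤ j + b ∧ j + b < n) && pvGetB R (i + a) (j + b)))

-- one synchronous whole-grid update (the `new = [[...]]` comprehension)
def pvDilate (mask : List (List Int)) (m n : Int) (R : List (List Bool)) : List (List Bool) :=
  (PySem.List.pyRange 0 m 1).map (fun i => (PySem.List.pyRange 0 n 1).map (fun j =>
    pvGetB R i j || (decide (pvGetCell mask i j = 0) && pvNbr R m n i j)))

-- `for _ in range(thickness-1): new = dilate(R); if new == R: break; R = new`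
def pvLoopD (mask : List (List Int)) (m n : Int) : Nat → List (List Bool) → List (List Bool)
  | 0, R => R
  | f + 1, R =>
    let new := pvDilate mask m n R
    if new = R then R else pvLoopD mask m n f new

def thicken_alt (mask : List (List Int)) (boundary : List (Int × Int)) (thickness : Int) : List (List Int) :=
  let m : Int := mask.length
  let n : Int := ((PySem.List.pyGetD mask 0 []).length : Int)
  let R0 := pvZeros m n
  let R := if 0 < thickness ∧ boundary ≠ [] then
      pvLoopD mask m n (thickness - 1).toNat (boundary.foldl (fun R c => pvSetB R c.1 c.2) R0)
    else R0
  (PySem.List.enumerate mask).map (fun p =>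
    (PySem.List.enumerate p.2).map (fun q =>
      if (q.1 : Int) < n ∧ pvGetB R p.1 q.1 then (1 : Int) else q.2))

-- ===== PRECONDITION & SPEC =====
-- Pre_ is the function's natural domain. It excludes: the empty mask (A raises IndexError on mask[0]);
-- and, when the BFS actually runs (a nonempty boundary and a positive thickness): boundary cells
-- outside the 0-based grid (A raises IndexError, or silently wraps a negative index); rows shorter
-- than row 0 (A can raise IndexError reading a neighbour; when the expansion never reaches the short
-- row both programs agree); and duplicate boundary entries (boundary is a Python set, so by the type
-- convention its list holds distinct elements).
def Pre_thicken (mask : List (List Int)) (boundary : List (Int × Int)) (thickness : Int) : Prop :=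
  mask ≠ [] ∧ (boundary = [] ∨ thickness ≤ 0 ∨
    ((∀ row ∈ mask, (mask.headD []).length ≤ row.length) ∧ boundary.Nodup ∧
      ∀ c ∈ boundary, 0 ≤ c.1 ∧ c.1 < (mask.length : Int) ∧ 0 ≤ c.2 ∧ c.2 < ((mask.headD []).length : Int)))
instance (mask : List (List Int)) (boundary : List (Int × Int)) (thickness : Int) : Decidable (Pre_thicken mask boundary thickness) := by unfold Pre_thicken; infer_instance

def pvWitness_thicken : List (List Int) × (List (Int × Int)) × Int := ([[0,0,0],[0,1,0],[0,0,0]], [(1,1)], 1)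

def Spec_thicken (mask : List (List Int)) (boundary : List (Int × Int)) (thickness : Int) (out : List (List Int)) : Prop := out = thicken_alt mask boundary thickness
instance (mask : List (List Int)) (boundary : List (Int × Int)) (thickness : Int) (out : List (List Int)) : Decidable (Spec_thicken mask boundary thickness out) := by unfold Spec_thicken; infer_instance

-- ===== CLAIM (what is proved, stated in full; the proofs are below) =====
def Claim_equal_thicken : Prop := ∀ (mask : List (List Int)) (boundary : List (Int × Int)) (thickness : Int), Dom_thicken mask boundary thickness → Pre_thicken mask boundary thickness → Spec_thicken mask boundary thickness (thicken mask boundary thickness)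

-- ===== LEMMAS AND PROOFS =====

-- ---- proof-side model: a pure levelwise frontier expansion. The A-side reduction shows A's
-- ---- mutating BFS computes pvMarkAll mask (pvExpand …); the B-side part shows the dilation
-- ---- iterates carry exactly the same cell set, level for level. ----

def pvStepA (m n : Int) (tm : List (List Int)) (k l : Int)
    (st : List (Int × Int) × List (Int × Int)) (ab : Int × Int) : List (Int × Int) × List (Int × Int) :=
  if 0 ≤ k + ab.1 ∧ k + ab.1 < m ∧ 0 ≤ l + ab.2 ∧ l + ab.2 < n then
    if pvGetCell tm (k + ab.1) (l + ab.2) = 0 ∧ (k + ab.1, l + ab.2) ∉ st.2 then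
      (st.1 ++ [(k + ab.1, l + ab.2)], PySem.Set.add st.2 (k + ab.1, l + ab.2))
    else st
  else st

def pvStepB (m n : Int) (mask : List (List Int)) (k l : Int)
    (st : List (Int × Int) × List (Int × Int)) (ab : Int × Int) : List (Int × Int) × List (Int × Int) :=
  if 0 ≤ k + ab.1 ∧ k + ab.1 < m ∧ 0 ≤ l + ab.2 ∧ l + ab.2 < n ∧
      pvGetCell mask (k + ab.1) (l + ab.2) = 0 ∧ (k + ab.1, l + ab.2) ∉ st.2 then
    (PySem.Set.add st.1 (k + ab.1, l + ab.2), PySem.Set.add st.2 (k + ab.1, l + ab.2))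
  else st

def pvScanB (m n : Int) (mask : List (List Int)) (k l : Int)
    (st : List (Int × Int) × List (Int × Int)) : List (Int × Int) × List (Int × Int) :=
  pvDirs.foldl (pvStepB m n mask k l) st

def pvCellStepB (m n : Int) (mask : List (List Int))
    (st : List (Int × Int) × List (Int × Int)) (c : Int × Int) : List (Int × Int) × List (Int × Int) :=
  pvScanB m n mask c.1 c.2 st

def pvCollect (m n : Int) (mask : List (List Int)) (f v : List (Int × Int)) :
    List (Int × Int) × List (Int × Int) :=
  f.foldl (pvCellStepB m n mask) ([], v)

-- levelwise frontier expansion, collecting the marked set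
def pvExpand (m n : Int) (mask : List (List Int)) : Nat → List (Int × Int) → List (Int × Int) →
    List (Int × Int) → List (Int × Int)
  | 0, mk, _, _ => mk
  | f + 1, mk, frontier, visited =>
    if frontier = [] then mk
    else
      let mk' := PySem.Set.union mk frontier
      let st' := pvCollect m n mask frontier visited
      pvExpand m n mask f mk' st'.1 st'.2

-- the m×n grid holding exactly the cells of S
def pvGridOf (m n : Int) (S : List (Int × Int)) : List (List Bool) :=
  (PySem.List.pyRange 0 m 1).map (fun i => (PySem.List.pyRange 0 n 1).map (fun j => decide ((i, j) ∈ S)))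

def pvMarkAll (mask : List (List Int)) (L : List (Int × Int)) : List (List Int) :=
  L.foldl (fun tm c => pvSetCell tm c.1 c.2) mask

def pvGetN (tm : List (List Int)) (i j : Nat) : Int := (tm.getD i []).getD j 0

def pvInb (m n : Int) (c : Int × Int) : Prop := 0 ≤ c.1 ∧ c.1 < m ∧ 0 ≤ c.2 ∧ c.2 < n

theorem stepA_eq (m n : Int) (tm : List (List Int)) (k l : Int) (acc v : List (Int × Int)) (d : Int × Int) :
    pvStepA m n tm k l (acc, v) d =
      if 0 ≤ k + d.1 ∧ k + d.1 < m ∧ 0 ≤ l + d.2 ∧ l + d.2 < n then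
        if pvGetCell tm (k + d.1) (l + d.2) = 0 ∧ (k + d.1, l + d.2) ∉ v then
          (acc ++ [(k + d.1, l + d.2)], PySem.Set.add v (k + d.1, l + d.2))
        else (acc, v)
      else (acc, v) := rfl

theorem stepB_eq (m n : Int) (mask : List (List Int)) (k l : Int) (acc v : List (Int × Int)) (d : Int × Int) :
    pvStepB m n mask k l (acc, v) d =
      if 0 ≤ k + d.1 ∧ k + d.1 < m ∧ 0 ≤ l + d.2 ∧ l + d.2 < n ∧
          pvGetCell mask (k + d.1) (l + d.2) = 0 ∧ (k + d.1, l + d.2) ∉ v then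
        (PySem.Set.add acc (k + d.1, l + d.2), PySem.Set.add v (k + d.1, l + d.2))
      else (acc, v) := rfl

theorem length_setCell (tm : List (List Int)) (k l : Int) : (pvSetCell tm k l).length = tm.length := by
  simp [pvSetCell]

theorem rowlen_setCell (tm : List (List Int)) (k l : Int) (i : Nat) :
    ((pvSetCell tm k l).getD i []).length = (tm.getD i []).length := by
  by_cases hi : i < tm.length
  · have hi2 : i < (pvSetCell tm k l).length := by simpa [length_setCell]
    rw [List.getD_eq_getElem _ _ hi2, List.getD_eq_getElem _ _ hi]
    simp only [pvSetCell, List.getElem_mapIdx]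
    split <;> simp
  · rw [List.getD_eq_default _ _ (by simp [length_setCell]; omega),
        List.getD_eq_default _ _ (by omega)]

theorem getN_setCell (tm : List (List Int)) (k l : Int) (i j : Nat)
    (hi : i < tm.length) (hj : j < (tm.getD i []).length) :
    pvGetN (pvSetCell tm k l) i j = if (i : Int) = k ∧ (j : Int) = l then 1 else pvGetN tm i j := by
  unfold pvGetN
  have hi2 : i < (pvSetCell tm k l).length := by simpa [length_setCell]
  rw [List.getD_eq_getElem _ _ hi2, List.getD_eq_getElem _ _ hi]
  simp only [pvSetCell, List.getElem_mapIdx]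
  by_cases hik : (i : Int) = k
  · rw [if_pos hik]
    have hj2 : j < (tm[i].mapIdx (fun j x => if (j : Int) = l then (1 : Int) else x)).length := by
      rw [List.length_mapIdx]; rwa [List.getD_eq_getElem _ _ hi] at hj
    have hj3 : j < tm[i].length := by rwa [List.getD_eq_getElem _ _ hi] at hj
    rw [List.getD_eq_getElem _ _ hj2, List.getD_eq_getElem _ _ hj3, List.getElem_mapIdx]
    by_cases hjl : (j : Int) = l <;> simp [hik, hjl]
  · simp [hik]

theorem length_markAll (mask : List (List Int)) (L : List (Int × Int)) :
    (pvMarkAll mask L).length = mask.length := by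
  induction L generalizing mask with
  | nil => rfl
  | cons c L ih => simp [pvMarkAll, List.foldl_cons] at *; rw [ih, length_setCell]

theorem rowlen_markAll (mask : List (List Int)) (L : List (Int × Int)) (i : Nat) :
    ((pvMarkAll mask L).getD i []).length = (mask.getD i []).length := by
  induction L generalizing mask with
  | nil => rfl
  | cons c L ih => simp only [pvMarkAll, List.foldl_cons] at *; rw [ih, rowlen_setCell]

theorem getN_markAll (mask : List (List Int)) (L : List (Int × Int)) (i j : Nat)
    (hi : i < mask.length) (hj : j < (mask.getD i []).length) :
    pvGetN (pvMarkAll mask L) i j = if ((i : Int), (j : Int)) ∈ L then 1 else pvGetN mask i j := by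
  induction L generalizing mask with
  | nil => simp [pvMarkAll]
  | cons c L ih =>
    simp only [pvMarkAll, List.foldl_cons] at *
    have hi' : i < (pvSetCell mask c.1 c.2).length := by rwa [length_setCell]
    have hj' : j < ((pvSetCell mask c.1 c.2).getD i []).length := by rwa [rowlen_setCell]
    rw [ih _ hi' hj', getN_setCell _ _ _ _ _ hi hj]
    by_cases hmem : ((i : Int), (j : Int)) ∈ L
    · simp [hmem]
    · by_cases hc : ((i : Int), (j : Int)) = c
      · have : (i : Int) = c.1 ∧ (j : Int) = c.2 := by
          constructor <;> (rw [← hc])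
        simp [this]
      · have : ¬ ((i : Int) = c.1 ∧ (j : Int) = c.2) := by
          intro h; apply hc; ext <;> simp [h.1, h.2]
        simp [hmem, hc, this]

theorem getCell_eq_getN (tm : List (List Int)) (k l : Int)
    (h0 : 0 ≤ k) (h1 : k < (tm.length : Int)) (h2 : 0 ≤ l) (h3 : l < ((tm.getD k.toNat []).length : Int)) :
    pvGetCell tm k l = pvGetN tm k.toNat l.toNat := by
  unfold pvGetCell pvGetN
  have hk : k.toNat < tm.length := by omega
  rw [PySem.List.pyGetD_eq_getElem _ _ h0 h1]
  have hrow : tm[k.toNat] = tm.getD k.toNat [] := (List.getD_eq_getElem _ _ hk).symm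
  have hl : l.toNat < (tm.getD k.toNat []).length := by omega
  rw [hrow, PySem.List.pyGetD_eq_getElem _ _ h2 (by omega), ← List.getD_eq_getElem _ _ hl]

theorem getCell_markAll_not_mem (mask : List (List Int)) (m n : Int)
    (hm : m = (mask.length : Int)) (hrect : ∀ row ∈ mask, n ≤ (row.length : Int))
    (L : List (Int × Int)) (k l : Int) (hb : pvInb m n (k, l)) (hL : (k, l) ∉ L) :
    pvGetCell (pvMarkAll mask L) k l = pvGetCell mask k l := by
  obtain ⟨hb1, hb2, hb3, hb4⟩ := hb
  have hk : k.toNat < mask.length := by omega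
  have hrowlen : n ≤ ((mask.getD k.toNat []).length : Int) := by
    have : mask.getD k.toNat [] ∈ mask := by
      rw [List.getD_eq_getElem _ _ hk]; exact List.getElem_mem hk
    exact hrect _ this
  have hl : l.toNat < (mask.getD k.toNat []).length := by omega
  have h1 : pvGetCell (pvMarkAll mask L) k l = pvGetN (pvMarkAll mask L) k.toNat l.toNat := by
    apply getCell_eq_getN
    · exact hb1
    · rw [length_markAll]; omega
    · exact hb3
    · rw [rowlen_markAll]; omega
  have h2 : pvGetCell mask k l = pvGetN mask k.toNat l.toNat := by
    exact getCell_eq_getN mask k l hb1 (by omega) hb3 (by omega)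
  rw [h1, h2, getN_markAll _ _ _ _ hk hl]
  have : ¬ (((k.toNat : Int), (l.toNat : Int)) ∈ L) := by
    have e1 : (k.toNat : Int) = k := by omega
    have e2 : (l.toNat : Int) = l := by omega
    rw [e1, e2]; exact hL
  rw [if_neg this]

-- scan-level facts about the frontier-expansion fold
theorem foldB_v_mono (m n : Int) (mask : List (List Int)) (k l : Int) (L : List (Int × Int))
    (acc v : List (Int × Int)) (x : Int × Int) (hx : x ∈ v) :
    x ∈ (L.foldl (pvStepB m n mask k l) (acc, v)).2 := by
  induction L generalizing acc v with
  | nil => simpa using hx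
  | cons d L ih =>
    rw [List.foldl_cons, stepB_eq]
    split_ifs with hc
    · exact ih _ _ (by rw [PySem.Set.mem_add]; exact Or.inl hx)
    · exact ih _ _ hx

theorem foldB_1_mono (m n : Int) (mask : List (List Int)) (k l : Int) (L : List (Int × Int))
    (acc v : List (Int × Int)) (x : Int × Int) (hx : x ∈ acc) :
    x ∈ (L.foldl (pvStepB m n mask k l) (acc, v)).1 := by
  induction L generalizing acc v with
  | nil => simpa using hx
  | cons d L ih =>
    rw [List.foldl_cons, stepB_eq]
    split_ifs with hc
    · exact ih _ _ (by rw [PySem.Set.mem_add]; exact Or.inl hx)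
    · exact ih _ _ hx

theorem foldB_new (m n : Int) (mask : List (List Int)) (k l : Int) (L : List (Int × Int))
    (acc v : List (Int × Int)) (x : Int × Int) (hx : x ∈ (L.foldl (pvStepB m n mask k l) (acc, v)).1) :
    x ∈ acc ∨ (x ∉ v ∧ x ∈ (L.foldl (pvStepB m n mask k l) (acc, v)).2) := by
  induction L generalizing acc v with
  | nil => left; simpa using hx
  | cons d L ih =>
    rw [List.foldl_cons, stepB_eq] at hx ⊢
    split_ifs at hx ⊢ with hc
    · rcases ih _ _ hx with h | h
      · rw [PySem.Set.mem_add] at h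
        rcases h with h | h
        · exact Or.inl h
        · refine Or.inr ⟨by rw [h]; exact hc.2.2.2.2.2, ?_⟩
          exact foldB_v_mono m n mask k l L _ _ x (by rw [PySem.Set.mem_add]; exact Or.inr h)
      · refine Or.inr ⟨fun hxv => h.1 (by rw [PySem.Set.mem_add]; exact Or.inl hxv), h.2⟩
    · exact ih _ _ hx

theorem foldB_sub (m n : Int) (mask : List (List Int)) (k l : Int) (L : List (Int × Int))
    (acc v : List (Int × Int)) (hav : ∀ y ∈ acc, y ∈ v) (x : Int × Int)
    (hx : x ∈ (L.foldl (pvStepB m n mask k l) (acc, v)).1) :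
    x ∈ (L.foldl (pvStepB m n mask k l) (acc, v)).2 := by
  rcases foldB_new m n mask k l L acc v x hx with h | h
  · exact foldB_v_mono m n mask k l L acc v x (hav x h)
  · exact h.2

-- the visited list after the scan holds exactly v plus the newly collected cells
theorem foldB_2_iff (m n : Int) (mask : List (List Int)) (k l : Int) (L : List (Int × Int))
    (acc v : List (Int × Int)) (hav : ∀ y ∈ acc, y ∈ v) (x : Int × Int) :
    x ∈ (L.foldl (pvStepB m n mask k l) (acc, v)).2 ↔
      x ∈ v ∨ x ∈ (L.foldl (pvStepB m n mask k l) (acc, v)).1 := by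
  induction L generalizing acc v with
  | nil =>
    simp only [List.foldl_nil]
    exact ⟨fun h => Or.inl h, fun h => h.elim id (fun h => hav x h)⟩
  | cons d L ih =>
    rw [List.foldl_cons, stepB_eq]
    split_ifs with hc
    · have hav' : ∀ y ∈ PySem.Set.add acc (k + d.1, l + d.2), y ∈ PySem.Set.add v (k + d.1, l + d.2) := by
        intro y hy
        rw [PySem.Set.mem_add] at hy ⊢
        exact hy.imp (hav y) id
      rw [ih _ _ hav']
      constructor
      · rintro (h | h)
        · rw [PySem.Set.mem_add] at h
          rcases h with h | h
          · exact Or.inl h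
          · refine Or.inr (foldB_1_mono m n mask k l L _ _ x ?_)
            rw [PySem.Set.mem_add]; exact Or.inr h
        · exact Or.inr h
      · rintro (h | h)
        · exact Or.inl (by rw [PySem.Set.mem_add]; exact Or.inl h)
        · exact Or.inr h
    · exact ih _ _ hav

-- everything the scan ever visits beyond v is in-bounds with mask value 0
theorem foldB_sound (m n : Int) (mask : List (List Int)) (k l : Int) (L : List (Int × Int))
    (acc v : List (Int × Int)) (x : Int × Int)
    (hx : x ∈ (L.foldl (pvStepB m n mask k l) (acc, v)).2) :
    x ∈ v ∨ (pvInb m n x ∧ pvGetCell mask x.1 x.2 = 0) := by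
  induction L generalizing acc v with
  | nil => exact Or.inl (by simpa using hx)
  | cons d L ih =>
    rw [List.foldl_cons, stepB_eq] at hx
    split_ifs at hx with hc
    · rcases ih _ _ hx with h | h
      · rw [PySem.Set.mem_add] at h
        rcases h with h | h
        · exact Or.inl h
        · subst h
          exact Or.inr ⟨⟨hc.1, hc.2.1, hc.2.2.1, hc.2.2.2.1⟩, hc.2.2.2.2.1⟩
      · exact Or.inr h
    · exact ih _ _ hx

-- everything the scan collects is a neighbour of (k,l) with mask value 0
theorem foldB_1_sound (m n : Int) (mask : List (List Int)) (k l : Int) (L : List (Int × Int))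
    (acc v : List (Int × Int)) (x : Int × Int)
    (hx : x ∈ (L.foldl (pvStepB m n mask k l) (acc, v)).1) :
    x ∈ acc ∨ (pvGetCell mask x.1 x.2 = 0 ∧ ∃ d ∈ L, x = (k + d.1, l + d.2)) := by
  induction L generalizing acc v with
  | nil => exact Or.inl (by simpa using hx)
  | cons d L ih =>
    rw [List.foldl_cons, stepB_eq] at hx
    split_ifs at hx with hc
    · rcases ih _ _ hx with h | h
      · rw [PySem.Set.mem_add] at h
        rcases h with h | h
        · exact Or.inl h
        · exact Or.inr ⟨by rw [h]; exact hc.2.2.2.2.1, d, List.mem_cons_self, h⟩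
      · exact Or.inr ⟨h.1, h.2.choose, List.mem_cons_of_mem _ h.2.choose_spec.1, h.2.choose_spec.2⟩
    · rcases ih _ _ hx with h | h
      · exact Or.inl h
      · exact Or.inr ⟨h.1, h.2.choose, List.mem_cons_of_mem _ h.2.choose_spec.1, h.2.choose_spec.2⟩

-- any admissible neighbour of (k,l) ends up visited after the scan
theorem foldB_cover (m n : Int) (mask : List (List Int)) (k l : Int) (L : List (Int × Int))
    (acc v : List (Int × Int)) (x : Int × Int)
    (hinb : pvInb m n x) (h0 : pvGetCell mask x.1 x.2 = 0)
    (hd : ∃ d ∈ L, x = (k + d.1, l + d.2)) :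
    x ∈ (L.foldl (pvStepB m n mask k l) (acc, v)).2 := by
  induction L generalizing acc v with
  | nil => simp at hd
  | cons d L ih =>
    rw [List.foldl_cons, stepB_eq]
    rcases hd with ⟨d', hd', hx⟩
    rcases List.mem_cons.mp hd' with h | h
    · subst h
      by_cases hv : (k + d'.1, l + d'.2) ∈ v
      · split_ifs with hc
        · exact foldB_v_mono m n mask k l L _ _ x
            (by rw [PySem.Set.mem_add]; exact Or.inl (hx ▸ hv))
        · exact foldB_v_mono m n mask k l L _ _ x (hx ▸ hv)
      · have hxi := hinb
        rw [hx] at hxi h0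
        rw [if_pos ⟨hxi.1, hxi.2.1, hxi.2.2.1, hxi.2.2.2, h0, hv⟩]
        exact foldB_v_mono m n mask k l L _ _ x
          (by rw [PySem.Set.mem_add]; exact Or.inr hx)
    · split_ifs with hc
      · exact ih _ _ ⟨d', h, hx⟩
      · exact ih _ _ ⟨d', h, hx⟩

-- lifting the scan facts over a whole frontier
theorem collect_v_mono (m n : Int) (mask : List (List Int)) (f : List (Int × Int))
    (acc v : List (Int × Int)) (x : Int × Int) (hx : x ∈ v) :
    x ∈ (f.foldl (pvCellStepB m n mask) (acc, v)).2 := by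
  induction f generalizing acc v with
  | nil => simpa using hx
  | cons c f ih =>
    rw [List.foldl_cons]
    exact ih _ _ (foldB_v_mono m n mask c.1 c.2 pvDirs acc v x hx)

theorem collect_1_mono (m n : Int) (mask : List (List Int)) (f : List (Int × Int))
    (acc v : List (Int × Int)) (x : Int × Int) (hx : x ∈ acc) :
    x ∈ (f.foldl (pvCellStepB m n mask) (acc, v)).1 := by
  induction f generalizing acc v with
  | nil => simpa using hx
  | cons c f ih =>
    rw [List.foldl_cons]
    exact ih _ _ (foldB_1_mono m n mask c.1 c.2 pvDirs acc v x hx)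

theorem collect_new (m n : Int) (mask : List (List Int)) (f : List (Int × Int))
    (acc v : List (Int × Int)) (x : Int × Int)
    (hx : x ∈ (f.foldl (pvCellStepB m n mask) (acc, v)).1) :
    x ∈ acc ∨ (x ∉ v ∧ x ∈ (f.foldl (pvCellStepB m n mask) (acc, v)).2) := by
  induction f generalizing acc v with
  | nil => left; simpa using hx
  | cons c f ih =>
    rw [List.foldl_cons] at hx ⊢
    rcases ih _ _ hx with h | h
    · rcases foldB_new m n mask c.1 c.2 pvDirs acc v x h with h2 | h2
      · exact Or.inl h2
      · refine Or.inr ⟨h2.1, ?_⟩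
        exact collect_v_mono m n mask f _ _ x h2.2
    · refine Or.inr ⟨fun hxv => h.1 (foldB_v_mono m n mask c.1 c.2 pvDirs acc v x hxv), h.2⟩

theorem collect_sub (m n : Int) (mask : List (List Int)) (f : List (Int × Int))
    (acc v : List (Int × Int)) (hav : ∀ y ∈ acc, y ∈ v) (x : Int × Int)
    (hx : x ∈ (f.foldl (pvCellStepB m n mask) (acc, v)).1) :
    x ∈ (f.foldl (pvCellStepB m n mask) (acc, v)).2 := by
  rcases collect_new m n mask f acc v x hx with h | h
  · exact collect_v_mono m n mask f acc v x (hav x h)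
  · exact h.2

theorem collect_2_iff (m n : Int) (mask : List (List Int)) (f : List (Int × Int))
    (acc v : List (Int × Int)) (hav : ∀ y ∈ acc, y ∈ v) (x : Int × Int) :
    x ∈ (f.foldl (pvCellStepB m n mask) (acc, v)).2 ↔
      x ∈ v ∨ x ∈ (f.foldl (pvCellStepB m n mask) (acc, v)).1 := by
  induction f generalizing acc v with
  | nil =>
    simp only [List.foldl_nil]
    exact ⟨fun h => Or.inl h, fun h => h.elim id (fun h => hav x h)⟩
  | cons c f ih =>
    rw [List.foldl_cons]
    rcases hW : pvDirs.foldl (pvStepB m n mask c.1 c.2) (acc, v) with ⟨a1, v1⟩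
    have h1 : x ∈ v1 ↔ x ∈ v ∨ x ∈ a1 := by
      have := foldB_2_iff m n mask c.1 c.2 pvDirs acc v hav x
      rw [hW] at this
      simpa using this
    have hsubv : ∀ y ∈ a1, y ∈ v1 := by
      intro y hy
      have := foldB_sub m n mask c.1 c.2 pvDirs acc v hav y (by rw [hW]; exact hy)
      rw [hW] at this
      exact this
    rw [show pvCellStepB m n mask (acc, v) c = (a1, v1) from by rw [← hW]; rfl]
    rw [ih a1 v1 hsubv, h1]
    constructor
    · rintro ((h | h) | h)
      · exact Or.inl h
      · exact Or.inr (collect_1_mono m n mask f _ _ x h)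
      · exact Or.inr h
    · rintro (h | h)
      · exact Or.inl (Or.inl h)
      · exact Or.inr h

theorem collect_sound (m n : Int) (mask : List (List Int)) (f : List (Int × Int))
    (acc v : List (Int × Int)) (x : Int × Int)
    (hx : x ∈ (f.foldl (pvCellStepB m n mask) (acc, v)).2) :
    x ∈ v ∨ (pvInb m n x ∧ pvGetCell mask x.1 x.2 = 0) := by
  induction f generalizing acc v with
  | nil => exact Or.inl (by simpa using hx)
  | cons c f ih =>
    rw [List.foldl_cons] at hx
    rcases ih _ _ hx with h | h
    · exact foldB_sound m n mask c.1 c.2 pvDirs acc v x h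
    · exact Or.inr h

theorem collect_1_sound (m n : Int) (mask : List (List Int)) (f : List (Int × Int))
    (acc v : List (Int × Int)) (x : Int × Int)
    (hx : x ∈ (f.foldl (pvCellStepB m n mask) (acc, v)).1) :
    x ∈ acc ∨ (pvGetCell mask x.1 x.2 = 0 ∧
      ∃ c ∈ f, ∃ d ∈ pvDirs, x = (c.1 + d.1, c.2 + d.2)) := by
  induction f generalizing acc v with
  | nil => exact Or.inl (by simpa using hx)
  | cons c f ih =>
    rw [List.foldl_cons] at hx
    rcases ih _ _ hx with h | h
    · rcases foldB_1_sound m n mask c.1 c.2 pvDirs acc v x h with h2 | h2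
      · exact Or.inl h2
      · exact Or.inr ⟨h2.1, c, List.mem_cons_self, h2.2.choose, h2.2.choose_spec.1, h2.2.choose_spec.2⟩
    · exact Or.inr ⟨h.1, h.2.choose, List.mem_cons_of_mem _ h.2.choose_spec.1, h.2.choose_spec.2⟩

theorem collect_cover (m n : Int) (mask : List (List Int)) (f : List (Int × Int))
    (acc v : List (Int × Int)) (x : Int × Int)
    (hinb : pvInb m n x) (h0 : pvGetCell mask x.1 x.2 = 0)
    (hd : ∃ c ∈ f, ∃ d ∈ pvDirs, x = (c.1 + d.1, c.2 + d.2)) :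
    x ∈ (f.foldl (pvCellStepB m n mask) (acc, v)).2 := by
  induction f generalizing acc v with
  | nil => simp at hd
  | cons c f ih =>
    rw [List.foldl_cons]
    rcases hd with ⟨c', hc', d, hdm, hx⟩
    rcases List.mem_cons.mp hc' with h | h
    · subst h
      exact collect_v_mono m n mask f _ _ x
        (foldB_cover m n mask c'.1 c'.2 pvDirs acc v x hinb h0 ⟨d, hdm, hx⟩)
    · exact ih _ _ ⟨c', h, d, hdm, hx⟩

-- the frame lemmas used by the A-side reduction
theorem foldB_nodup (m n : Int) (mask : List (List Int)) (k l : Int) (L : List (Int × Int))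
    (acc v : List (Int × Int)) (hnd : acc.Nodup) (hav : ∀ y ∈ acc, y ∈ v) :
    (L.foldl (pvStepB m n mask k l) (acc, v)).1.Nodup := by
  induction L generalizing acc v with
  | nil => simpa using hnd
  | cons d L ih =>
    rw [List.foldl_cons, stepB_eq]
    split_ifs with hc
    · have hna : (k + d.1, l + d.2) ∉ acc := fun h => hc.2.2.2.2.2 (hav _ h)
      rw [PySem.Set.add_of_not_mem hna]
      refine ih _ _ ?_ ?_
      · rw [← List.concat_eq_append]; exact List.Nodup.concat hna hnd
      · intro y hy
        rw [PySem.Set.mem_add]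
        rcases List.mem_append.mp hy with h | h
        · exact Or.inl (hav _ h)
        · exact Or.inr (List.mem_singleton.mp h)
    · exact ih _ _ hnd hav

theorem foldB_frame (m n : Int) (mask : List (List Int)) (k l : Int) (L : List (Int × Int))
    (acc v : List (Int × Int)) (hav : ∀ y ∈ acc, y ∈ v) :
    L.foldl (pvStepB m n mask k l) (acc, v) =
      (acc ++ (L.foldl (pvStepB m n mask k l) ([], v)).1, (L.foldl (pvStepB m n mask k l) ([], v)).2) := by
  induction L generalizing acc v with
  | nil => simp
  | cons d L ih =>
    rw [List.foldl_cons, List.foldl_cons, stepB_eq, stepB_eq]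
    split_ifs with hc
    · have hna : (k + d.1, l + d.2) ∉ acc := fun h => hc.2.2.2.2.2 (hav _ h)
      rw [PySem.Set.add_of_not_mem hna, PySem.Set.add_of_not_mem (List.not_mem_nil), List.nil_append]
      have hav' : ∀ y ∈ acc ++ [(k + d.1, l + d.2)], y ∈ PySem.Set.add v (k + d.1, l + d.2) := by
        intro y hy
        rw [PySem.Set.mem_add]
        rcases List.mem_append.mp hy with h | h
        · exact Or.inl (hav _ h)
        · exact Or.inr (List.mem_singleton.mp h)
      have hav'' : ∀ y ∈ [(k + d.1, l + d.2)], y ∈ PySem.Set.add v (k + d.1, l + d.2) := by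
        intro y hy
        rw [PySem.Set.mem_add]
        exact Or.inr (List.mem_singleton.mp hy)
      rw [ih _ _ hav', ih _ _ hav'']
      simp
    · exact ih _ _ hav

theorem foldA_eq_foldB (m n : Int) (tm mask : List (List Int)) (k l : Int) (L : List (Int × Int))
    (acc v : List (Int × Int))
    (hagree : ∀ c : Int × Int, pvInb m n c → c ∉ v → pvGetCell tm c.1 c.2 = pvGetCell mask c.1 c.2) :
    L.foldl (pvStepA m n tm k l) (acc, v) =
      (acc ++ (L.foldl (pvStepB m n mask k l) ([], v)).1, (L.foldl (pvStepB m n mask k l) ([], v)).2) := by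
  induction L generalizing acc v with
  | nil => simp
  | cons d L ih =>
    rw [List.foldl_cons, List.foldl_cons, stepA_eq, stepB_eq]
    by_cases hinb : 0 ≤ k + d.1 ∧ k + d.1 < m ∧ 0 ≤ l + d.2 ∧ l + d.2 < n
    · by_cases hv : (k + d.1, l + d.2) ∈ v
      · rw [if_pos hinb, if_neg (by tauto), if_neg (by tauto)]
        exact ih _ _ hagree
      · have hag := hagree (k + d.1, l + d.2) ⟨hinb.1, hinb.2.1, hinb.2.2.1, hinb.2.2.2⟩ hv
        by_cases hget : pvGetCell mask (k + d.1) (l + d.2) = 0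
        · rw [if_pos hinb, if_pos ⟨by rw [hag]; exact hget, hv⟩,
              if_pos ⟨hinb.1, hinb.2.1, hinb.2.2.1, hinb.2.2.2, hget, hv⟩]
          rw [PySem.Set.add_of_not_mem (List.not_mem_nil), List.nil_append]
          have hagree' : ∀ c : Int × Int, pvInb m n c → c ∉ PySem.Set.add v (k + d.1, l + d.2) →
              pvGetCell tm c.1 c.2 = pvGetCell mask c.1 c.2 := by
            intro c hcb hcv
            exact hagree c hcb (fun h => hcv (by rw [PySem.Set.mem_add]; exact Or.inl h))
          rw [ih _ _ hagree']
          have hav : ∀ y ∈ [(k + d.1, l + d.2)], y ∈ PySem.Set.add v (k + d.1, l + d.2) := by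
            intro y hy
            rw [PySem.Set.mem_add]
            exact Or.inr (List.mem_singleton.mp hy)
          rw [foldB_frame m n mask k l L _ _ hav]
          simp
        · rw [if_pos hinb, if_neg (by rw [hag]; tauto), if_neg (by tauto)]
          exact ih _ _ hagree
    · rw [if_neg hinb, if_neg (by tauto)]
      exact ih _ _ hagree

theorem collect_nodup (m n : Int) (mask : List (List Int)) (f : List (Int × Int))
    (acc v : List (Int × Int)) (hnd : acc.Nodup) (hav : ∀ y ∈ acc, y ∈ v) :
    (f.foldl (pvCellStepB m n mask) (acc, v)).1.Nodup := by
  induction f generalizing acc v with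
  | nil => simpa using hnd
  | cons c f ih =>
    rw [List.foldl_cons]
    refine ih _ _ ?_ ?_
    · exact foldB_nodup m n mask c.1 c.2 pvDirs acc v hnd hav
    · intro y hy
      exact foldB_sub m n mask c.1 c.2 pvDirs acc v hav y hy

theorem collect_frame (m n : Int) (mask : List (List Int)) (f : List (Int × Int))
    (acc v : List (Int × Int)) (hav : ∀ y ∈ acc, y ∈ v) :
    f.foldl (pvCellStepB m n mask) (acc, v) =
      (acc ++ (pvCollect m n mask f v).1, (pvCollect m n mask f v).2) := by
  induction f generalizing acc v with
  | nil => simp [pvCollect]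
  | cons c f ih =>
    have h1 : pvCellStepB m n mask (acc, v) c =
        (acc ++ (pvCellStepB m n mask ([], v) c).1, (pvCellStepB m n mask ([], v) c).2) :=
      foldB_frame m n mask c.1 c.2 pvDirs acc v hav
    have hd : ∀ y ∈ (pvCellStepB m n mask ([], v) c).1, y ∈ (pvCellStepB m n mask ([], v) c).2 :=
      fun y hy => foldB_sub m n mask c.1 c.2 pvDirs [] v (by simp) y hy
    have hvm : ∀ y ∈ v, y ∈ (pvCellStepB m n mask ([], v) c).2 :=
      fun y hy => foldB_v_mono m n mask c.1 c.2 pvDirs [] v y hy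
    have hav' : ∀ y ∈ acc ++ (pvCellStepB m n mask ([], v) c).1, y ∈ (pvCellStepB m n mask ([], v) c).2 := by
      intro y hy
      rcases List.mem_append.mp hy with h | h
      · exact hvm y (hav y h)
      · exact hd y h
    rw [List.foldl_cons, h1, ih _ _ hav']
    have h2 : pvCollect m n mask (c :: f) v =
        ((pvCellStepB m n mask ([], v) c).1 ++ (pvCollect m n mask f (pvCellStepB m n mask ([], v) c).2).1,
          (pvCollect m n mask f (pvCellStepB m n mask ([], v) c).2).2) := by
      unfold pvCollect
      rw [List.foldl_cons]
      exact ih _ _ hd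
    rw [h2]
    simp [List.append_assoc]

-- one BFS level of A equals marking the frontier and collecting the next one
theorem pvRound_eq (mask : List (List Int)) (m n : Int)
    (hm : m = (mask.length : Int)) (hrect : ∀ row ∈ mask, n ≤ (row.length : Int))
    (front : List (Int × Int)) :
    ∀ (rest mkL v : List (Int × Int)), (∀ x ∈ mkL, x ∈ v) → (∀ x ∈ front, x ∈ v) →
    pvRoundA m n front.length (pvMarkAll mask mkL, front ++ rest, v) =
      (pvMarkAll mask (mkL ++ front), rest ++ (pvCollect m n mask front v).1,
        (pvCollect m n mask front v).2) := by
  induction front with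
  | nil =>
    intro rest mkL v _ _
    simp [pvRoundA, pvCollect]
  | cons c ft ih =>
    obtain ⟨k, l⟩ := c
    intro rest mkL v hmk hf
    have hkl : (k, l) ∈ v := hf _ (List.mem_cons_self)
    have hsub : ∀ x ∈ mkL ++ [(k, l)], x ∈ v := by
      intro x hx
      rcases List.mem_append.mp hx with h | h
      · exact hmk _ h
      · rw [List.mem_singleton.mp h]; exact hkl
    have htm : pvSetCell (pvMarkAll mask mkL) k l = pvMarkAll mask (mkL ++ [(k, l)]) := by
      simp [pvMarkAll, List.foldl_append]
    have hagree : ∀ c' : Int × Int, pvInb m n c' → c' ∉ v →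
        pvGetCell (pvMarkAll mask (mkL ++ [(k, l)])) c'.1 c'.2 = pvGetCell mask c'.1 c'.2 := by
      intro c' hb hcv
      exact getCell_markAll_not_mem mask m n hm hrect _ c'.1 c'.2 hb
        (fun h => hcv (hsub _ h))
    have hscan : pvScanA m n (pvMarkAll mask (mkL ++ [(k, l)])) k l (ft ++ rest, v) =
        ((ft ++ rest) ++ (pvCellStepB m n mask ([], v) (k, l)).1,
          (pvCellStepB m n mask ([], v) (k, l)).2) :=
      foldA_eq_foldB m n _ mask k l pvDirs (ft ++ rest) v hagree
    have hds : ∀ y ∈ (pvCellStepB m n mask ([], v) (k, l)).1, y ∈ (pvCellStepB m n mask ([], v) (k, l)).2 :=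
      fun y hy => foldB_sub m n mask k l pvDirs [] v (by simp) y hy
    have hvm : ∀ y ∈ v, y ∈ (pvCellStepB m n mask ([], v) (k, l)).2 :=
      fun y hy => foldB_v_mono m n mask k l pvDirs [] v y hy
    show pvRoundA m n (ft.length + 1) _ = _
    simp only [pvRoundA]
    simp only [List.cons_append, htm, hscan]
    have hstep := ih (rest ++ (pvCellStepB m n mask ([], v) (k, l)).1) (mkL ++ [(k, l)])
      (pvCellStepB m n mask ([], v) (k, l)).2
      (fun x hx => hvm x (hsub x hx))
      (fun x hx => hvm x (hf x (List.mem_cons_of_mem _ hx)))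
    rw [List.append_assoc, hstep]
    have h2 : pvCollect m n mask ((k, l) :: ft) v =
        ((pvCellStepB m n mask ([], v) (k, l)).1 ++
            (pvCollect m n mask ft (pvCellStepB m n mask ([], v) (k, l)).2).1,
          (pvCollect m n mask ft (pvCellStepB m n mask ([], v) (k, l)).2).2) := by
      unfold pvCollect
      rw [List.foldl_cons]
      exact collect_frame m n mask ft _ _ hds
    rw [h2]
    simp [List.append_assoc]

-- A's whole BFS computes the pure levelwise expansion, painted onto the grid
theorem pvLoop_eq (mask : List (List Int)) (m n : Int)
    (hm : m = (mask.length : Int)) (hrect : ∀ row ∈ mask, n ≤ (row.length : Int)) :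
    ∀ (fuel : Nat) (mkL f v : List (Int × Int)), (∀ x ∈ mkL, x ∈ v) → (∀ x ∈ f, x ∈ v) →
      f.Nodup → (∀ x ∈ f, x ∉ mkL) →
    pvLoopA m n fuel (pvMarkAll mask mkL, f, v) =
      pvMarkAll mask (pvExpand m n mask fuel mkL f v) := by
  intro fuel
  induction fuel with
  | zero => intro mkL f v _ _ _ _; rfl
  | succ fl ih =>
    intro mkL f v hmk hf hnd hdisj
    by_cases hfe : f = []
    · subst hfe
      simp [pvLoopA, pvExpand]
    · rw [pvLoopA, pvExpand, if_neg hfe, if_neg hfe]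
      have hr := pvRound_eq mask m n hm hrect f [] mkL v hmk hf
      rw [List.append_nil] at hr
      rw [hr]
      have hu : PySem.Set.union mkL f = mkL ++ f :=
        PySem.Set.update_eq_append_of_disjoint mkL f hnd hdisj
      rw [hu, List.nil_append]
      have hvm : ∀ y ∈ v, y ∈ (pvCollect m n mask f v).2 :=
        fun y hy => collect_v_mono m n mask f [] v y hy
      refine ih (mkL ++ f) (pvCollect m n mask f v).1 (pvCollect m n mask f v).2 ?_ ?_ ?_ ?_
      · intro x hx
        rcases List.mem_append.mp hx with h | h
        · exact hvm x (hmk x h)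
        · exact hvm x (hf x h)
      · exact fun x hx => collect_sub m n mask f [] v (by simp) x hx
      · exact collect_nodup m n mask f [] v (by simp) (by simp)
      · intro x hx hmem
        rcases collect_new m n mask f [] v x hx with h | h
        · simp at h
        · rcases List.mem_append.mp hmem with h2 | h2
          · exact h.1 (hmk x h2)
          · exact h.1 (hf x h2)

theorem loopA_nil_q (m n : Int) (fuel : Nat) (tm : List (List Int)) (inq : List (Int × Int)) :
    pvLoopA m n fuel (tm, [], inq) = tm := by
  cases fuel with
  | zero => rfl
  | succ f => simp [pvLoopA]

theorem expand_nil (m n : Int) (mask : List (List Int)) (fuel : Nat) (mk v : List (Int × Int)) :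
    pvExpand m n mask fuel mk [] v = mk := by
  cases fuel with
  | zero => rfl
  | succ f => simp [pvExpand]

-- every marked cell is in-bounds
theorem expand_inb (m n : Int) (mask : List (List Int)) :
    ∀ (fuel : Nat) (mk front v : List (Int × Int)),
    (∀ c ∈ mk, pvInb m n c) → (∀ c ∈ front, pvInb m n c) → (∀ c ∈ v, pvInb m n c) →
    ∀ c ∈ pvExpand m n mask fuel mk front v, pvInb m n c := by
  intro fuel
  induction fuel with
  | zero => intro mk front v hmk _ _ c hc; exact hmk c hc
  | succ f ih =>
    intro mk front v hmk hfr hv c hc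
    rw [pvExpand] at hc
    split_ifs at hc with hfe
    · exact hmk c hc
    · have hv' : ∀ x ∈ (pvCollect m n mask front v).2, pvInb m n x := by
        intro x hx
        rcases collect_sound m n mask front [] v x hx with h | h
        · exact hv x h
        · exact h.1
      refine ih _ _ _ ?_ ?_ hv' c hc
      · intro x hx
        rw [PySem.Set.mem_union] at hx
        rcases hx with h | h
        · exact hmk x h
        · exact hfr x h
      · intro x hx
        exact hv' x (collect_sub m n mask front [] v (by simp) x hx)

-- direction-set facts
theorem dirs_comp (d : Int × Int) (hd : d ∈ pvDirs) :
    d.1 ∈ ([(-1 : Int), 0, 1] : List Int) ∧ d.2 ∈ ([(-1 : Int), 0, 1] : List Int) := by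
  simp only [pvDirs, List.mem_cons, List.not_mem_nil, or_false] at hd
  rcases hd with h | h | h | h | h | h | h | h <;> (subst h; simp)

theorem neg_mem_range3 (a : Int) (ha : a ∈ ([(-1 : Int), 0, 1] : List Int)) :
    -a ∈ ([(-1 : Int), 0, 1] : List Int) := by
  simp only [List.mem_cons, List.not_mem_nil, or_false] at ha ⊢
  rcases ha with h | h | h <;> (subst h; norm_num)

theorem dirs_neg (d : Int × Int) (hd : d ∈ pvDirs) : (-d.1, -d.2) ∈ pvDirs := by
  simp only [pvDirs, List.mem_cons, List.not_mem_nil, or_false] at hd ⊢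
  rcases hd with h | h | h | h | h | h | h | h <;> (subst h; norm_num)

theorem mem_dirs_of_comp (a b : Int) (ha : a ∈ ([(-1 : Int), 0, 1] : List Int))
    (hb : b ∈ ([(-1 : Int), 0, 1] : List Int)) (hz : ¬ (a = 0 ∧ b = 0)) : (a, b) ∈ pvDirs := by
  simp only [List.mem_cons, List.not_mem_nil, or_false] at ha hb
  rcases ha with h | h | h <;> rcases hb with h' | h' | h' <;>
    (subst h; subst h'; simp_all [pvDirs])

-- grid lemmas
theorem getB_gridOf (m n : Int) (S : List (Int × Int)) (i j : Int)
    (h0 : 0 ≤ i) (h1 : i < m) (h2 : 0 ≤ j) (h3 : j < n) :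
    pvGetB (pvGridOf m n S) i j = decide ((i, j) ∈ S) := by
  unfold pvGetB pvGridOf
  have hi : i.toNat < ((PySem.List.pyRange 0 m 1).map
      (fun i => (PySem.List.pyRange 0 n 1).map (fun j => decide ((i, j) ∈ S)))).length := by
    simp [PySem.List.length_pyRange_one]; omega
  rw [List.getD_eq_getElem _ _ hi, List.getElem_map]
  have hj : j.toNat < ((PySem.List.pyRange 0 n 1).map
      (fun jj => decide ((((PySem.List.pyRange 0 m 1)[i.toNat]'(by
        simp [PySem.List.length_pyRange_one]; omega) : Int), jj) ∈ S))).length := by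
    simp [PySem.List.length_pyRange_one]; omega
  rw [List.getD_eq_getElem _ _ hj, List.getElem_map]
  simp only [PySem.List.getElem_pyRange_one]
  have hpe : ((0 : Int) + (i.toNat : Int), (0 : Int) + (j.toNat : Int)) = (i, j) := by
    rw [Prod.mk.injEq]
    omega
  rw [hpe]

theorem gridOf_congr (m n : Int) (S T : List (Int × Int))
    (h : ∀ i j : Int, 0 ≤ i → i < m → 0 ≤ j → j < n → ((i, j) ∈ S ↔ (i, j) ∈ T)) :
    pvGridOf m n S = pvGridOf m n T := by
  unfold pvGridOf
  apply List.map_congr_left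
  intro i hi
  rw [PySem.List.mem_pyRange_one] at hi
  apply List.map_congr_left
  intro j hj
  rw [PySem.List.mem_pyRange_one] at hj
  exact decide_eq_decide.mpr (h i j hi.1 hi.2 hj.1 hj.2)

theorem gridOf_mem_of_eq (m n : Int) (S T : List (Int × Int))
    (h : pvGridOf m n S = pvGridOf m n T) (i j : Int)
    (h0 : 0 ≤ i) (h1 : i < m) (h2 : 0 ≤ j) (h3 : j < n) : ((i, j) ∈ S ↔ (i, j) ∈ T) := by
  have := congrArg (fun R => pvGetB R i j) h
  simp only [getB_gridOf m n _ i j h0 h1 h2 h3] at this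
  exact decide_eq_decide.mp this

theorem zeros_eq_gridOf (m n : Int) : pvZeros m n = pvGridOf m n [] := by
  unfold pvZeros pvGridOf
  apply List.map_congr_left
  intro i _
  apply List.map_congr_left
  intro j _
  simp

theorem setB_gridOf (m n : Int) (S : List (Int × Int)) (c : Int × Int) :
    pvSetB (pvGridOf m n S) c.1 c.2 = pvGridOf m n (S ++ [c]) := by
  unfold pvSetB pvGridOf
  apply List.ext_getElem
  · simp
  · intro k h1 h2
    simp only [List.getElem_mapIdx, List.getElem_map, PySem.List.getElem_pyRange_one]
    by_cases hk : ((k : Nat) : Int) = c.1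
    · rw [if_pos hk]
      apply List.ext_getElem
      · simp
      · intro j hj1 hj2
        simp only [List.getElem_mapIdx, List.getElem_map, PySem.List.getElem_pyRange_one]
        by_cases hj : ((j : Nat) : Int) = c.2
        · rw [if_pos hj]
          have hpc : ((0 : Int) + (k : Int), (0 : Int) + (j : Int)) = c := by
            rw [Prod.ext_iff]
            constructor <;> simp <;> omega
          rw [hpc]
          exact (decide_eq_true (by simp)).symm
        · rw [if_neg hj]
          apply decide_eq_decide.mpr
          have hpc : ((0 : Int) + (k : Int), (0 : Int) + (j : Int)) ≠ c := by
            intro h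
            apply hj
            have := congrArg Prod.snd h
            simpa using this
          rw [List.mem_append, List.mem_singleton]
          constructor
          · exact Or.inl
          · rintro (h | h)
            · exact h
            · exact absurd h hpc
    · rw [if_neg hk]
      apply List.map_congr_left
      intro j _
      apply decide_eq_decide.mpr
      have hpc : ((0 : Int) + (k : Int), j) ≠ c := by
        intro h
        apply hk
        have := congrArg Prod.fst h
        simpa using this
      rw [List.mem_append, List.mem_singleton]
      constructor
      · exact Or.inl
      · rintro (h | h)
        · exact h
        · exact absurd h hpc

theorem foldSetB_gridOf (m n : Int) (B : List (Int × Int)) :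
    ∀ (S : List (Int × Int)),
    B.foldl (fun R c => pvSetB R c.1 c.2) (pvGridOf m n S) = pvGridOf m n (S ++ B) := by
  induction B with
  | nil => intro S; simp
  | cons c B ih =>
    intro S
    rw [List.foldl_cons, setB_gridOf m n S c, ih (S ++ [c])]
    simp

-- the neighbour test on the grid of v
theorem nbr_gridOf (m n : Int) (v : List (Int × Int)) (i j : Int) :
    pvNbr (pvGridOf m n v) m n i j =
      decide (∃ a ∈ ([(-1 : Int), 0, 1] : List Int), ∃ b ∈ ([(-1 : Int), 0, 1] : List Int),
        (0 ≤ i + a ∧ i + a < m ∧ 0 ≤ j + b ∧ j + b < n) ∧ (i + a, j + b) ∈ v) := by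
  apply Bool.eq_iff_iff.mpr
  rw [decide_eq_true_iff]
  unfold pvNbr
  simp only [List.any_eq_true, Bool.and_eq_true, decide_eq_true_iff]
  constructor
  · rintro ⟨a, ha, b, hb, hg, hB⟩
    refine ⟨a, ha, b, hb, hg, ?_⟩
    rw [getB_gridOf m n v _ _ hg.1 hg.2.1 hg.2.2.1 hg.2.2.2] at hB
    exact of_decide_eq_true hB
  · rintro ⟨a, ha, b, hb, hg, hm⟩
    refine ⟨a, ha, b, hb, hg, ?_⟩
    rw [getB_gridOf m n v _ _ hg.1 hg.2.1 hg.2.2.1 hg.2.2.2]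
    exact decide_eq_true hm

-- one synchronous update of the grid of v is the grid of v plus all admissible neighbours
theorem dilate_gridOf (mask : List (List Int)) (m n : Int) (v T : List (Int × Int))
    (h : ∀ i j : Int, 0 ≤ i → i < m → 0 ≤ j → j < n →
      ((i, j) ∈ T ↔ ((i, j) ∈ v ∨ (pvGetCell mask i j = 0 ∧
        ∃ a ∈ ([(-1 : Int), 0, 1] : List Int), ∃ b ∈ ([(-1 : Int), 0, 1] : List Int),
          (0 ≤ i + a ∧ i + a < m ∧ 0 ≤ j + b ∧ j + b < n) ∧ (i + a, j + b) ∈ v)))) :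
    pvDilate mask m n (pvGridOf m n v) = pvGridOf m n T := by
  rw [pvDilate]
  conv_rhs => rw [pvGridOf]
  apply List.map_congr_left
  intro i hi
  rw [PySem.List.mem_pyRange_one] at hi
  apply List.map_congr_left
  intro j hj
  rw [PySem.List.mem_pyRange_one] at hj
  rw [getB_gridOf m n v i j hi.1 hi.2 hj.1 hj.2, nbr_gridOf m n v i j,
    ← Bool.decide_and, ← Bool.decide_or]
  exact decide_eq_decide.mpr (h i j hi.1 hi.2 hj.1 hj.2).symm

-- THE CORE: the dilation iterates carry exactly the visited set of the frontier expansion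
theorem expand_grid (mask : List (List Int)) (m n : Int) :
    ∀ (f : Nat) (mk front v : List (Int × Int)),
    (∀ c ∈ v, pvInb m n c) →
    (∀ c : Int × Int, c ∈ v ↔ (c ∈ mk ∨ c ∈ front)) →
    (∀ c : Int × Int, pvInb m n c → pvGetCell mask c.1 c.2 = 0 →
      (∃ d ∈ pvDirs, (c.1 + d.1, c.2 + d.2) ∈ v) → c ∈ v ∨ ∃ d ∈ pvDirs, (c.1 + d.1, c.2 + d.2) ∈ front) →
    pvLoopD mask m n f (pvGridOf m n v) = pvGridOf m n (pvExpand m n mask (f + 1) mk front v) := by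
  intro f
  induction f with
  | zero =>
    intro mk front v hin hmv hstep
    rw [show pvLoopD mask m n 0 (pvGridOf m n v) = pvGridOf m n v from rfl]
    rw [pvExpand]
    split_ifs with hfe
    · subst hfe
      exact gridOf_congr m n v mk (fun i j _ _ _ _ => by rw [hmv]; simp)
    · exact gridOf_congr m n v (PySem.Set.union mk front)
        (fun i j _ _ _ _ => by rw [hmv, PySem.Set.mem_union])
  | succ f ih =>
    intro mk front v hin hmv hstep
    have hfv : ∀ c ∈ front, c ∈ v := fun c hc => (hmv c).mpr (Or.inr hc)
    set S := (pvCollect m n mask front v).1 with hS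
    set v' := (pvCollect m n mask front v).2 with hv'
    have hmemv' : ∀ c : Int × Int, c ∈ v' ↔ (c ∈ v ∨ c ∈ S) :=
      fun c => collect_2_iff m n mask front [] v (by simp) c
    have hSnew : ∀ c ∈ S, c ∉ v := by
      intro c hc
      rcases collect_new m n mask front [] v c hc with h | h
      · simp at h
      · exact h.1
    have hSin : ∀ c ∈ S, pvInb m n c := by
      intro c hc
      rcases collect_sound m n mask front [] v c
        ((hmemv' c).mpr (Or.inr hc)) with h | h
      · exact absurd h (hSnew c hc)
      · exact h.1
    have hin' : ∀ c ∈ v', pvInb m n c := by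
      intro c hc
      rcases (hmemv' c).mp hc with h | h
      · exact hin c h
      · exact hSin c h
    -- one dilation step lands exactly on the new visited set
    have hdil : pvDilate mask m n (pvGridOf m n v) = pvGridOf m n v' := by
      apply dilate_gridOf
      intro i j h0 h1 h2 h3
      rw [hmemv']
      constructor
      · rintro (h | h)
        · exact Or.inl h
        · rcases collect_1_sound m n mask front [] v (i, j) h with h2' | h2'
          · simp at h2'
          · obtain ⟨hz, c, hcf, d, hdm, he⟩ := h2'
            have hc1 : i + -d.1 = c.1 := by
              have := congrArg Prod.fst he; simp at this; omega
            have hc2 : j + -d.2 = c.2 := by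
              have := congrArg Prod.snd he; simp at this; omega
            refine Or.inr ⟨hz, -d.1, neg_mem_range3 d.1 (dirs_comp d hdm).1,
              -d.2, neg_mem_range3 d.2 (dirs_comp d hdm).2, ?_, ?_⟩
            · have hcb := hin c (hfv c hcf)
              rw [hc1, hc2]
              exact ⟨hcb.1, hcb.2.1, hcb.2.2.1, hcb.2.2.2⟩
            · rw [hc1, hc2]
              exact hfv c hcf
      · rintro (h | ⟨hz, a, ha, b, hb, hg, hm⟩)
        · exact Or.inl h
        · by_cases hz0 : a = 0 ∧ b = 0
          · left
            obtain ⟨ha0, hb0⟩ := hz0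
            subst ha0; subst hb0
            simpa using hm
          · have hdm : (a, b) ∈ pvDirs := mem_dirs_of_comp a b ha hb hz0
            rcases hstep (i, j) ⟨h0, h1, h2, h3⟩ hz ⟨(a, b), hdm, hm⟩ with h | ⟨d, hdm', hfm⟩
            · exact Or.inl h
            · refine (hmemv' (i, j)).mp ?_
              apply collect_cover m n mask front [] v (i, j) ⟨h0, h1, h2, h3⟩ hz
              refine ⟨(i + d.1, j + d.2), hfm, (-d.1, -d.2), dirs_neg d hdm', ?_⟩
              rw [Prod.ext_iff]
              constructor <;> simp
    by_cases hSe : S = []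
    · -- fixpoint: the dilation does not change, the frontier empties
      have hveq : ∀ c : Int × Int, c ∈ v' ↔ c ∈ v := by
        intro c
        rw [hmemv', hSe]
        simp
      have hgeq : pvGridOf m n v' = pvGridOf m n v :=
        gridOf_congr m n v' v (fun i j _ _ _ _ => hveq (i, j))
      rw [show pvLoopD mask m n (f + 1) (pvGridOf m n v) =
          (if pvDilate mask m n (pvGridOf m n v) = pvGridOf m n v then pvGridOf m n v
            else pvLoopD mask m n f (pvDilate mask m n (pvGridOf m n v))) from rfl]
      rw [if_pos (by rw [hdil, hgeq])]
      by_cases hfr : front = []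
      · subst hfr
        rw [expand_nil]
        exact gridOf_congr m n v mk (fun i j _ _ _ _ => by rw [hmv]; simp)
      · have hE : pvExpand m n mask (f + 1 + 1) mk front v = PySem.Set.union mk front := by
          rw [pvExpand, if_neg hfr]
          show pvExpand m n mask (f + 1) (PySem.Set.union mk front)
            ((pvCollect m n mask front v).1) ((pvCollect m n mask front v).2) = _
          rw [← hS, hSe, expand_nil]
        rw [hE]
        exact gridOf_congr m n v _ (fun i j _ _ _ _ => by rw [hmv, PySem.Set.mem_union])
    · -- the frontier is nonempty and the dilation strictly grows
      have hfr : front ≠ [] := by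
        intro hfe
        apply hSe
        rw [hS, hfe]
        rfl
      obtain ⟨c0, hc0⟩ := List.exists_mem_of_ne_nil S hSe
      have hc0v : c0 ∉ v := hSnew c0 hc0
      have hc0b : pvInb m n c0 := hSin c0 hc0
      have hne : pvDilate mask m n (pvGridOf m n v) ≠ pvGridOf m n v := by
        intro heq
        rw [hdil] at heq
        have := (gridOf_mem_of_eq m n v' v heq c0.1 c0.2 hc0b.1 hc0b.2.1 hc0b.2.2.1 hc0b.2.2.2).mp
          (by rw [show (c0.1, c0.2) = c0 from rfl]; exact (hmemv' c0).mpr (Or.inr hc0))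
        rw [show (c0.1, c0.2) = c0 from rfl] at this
        exact hc0v this
      rw [show pvLoopD mask m n (f + 1) (pvGridOf m n v) =
          (if pvDilate mask m n (pvGridOf m n v) = pvGridOf m n v then pvGridOf m n v
            else pvLoopD mask m n f (pvDilate mask m n (pvGridOf m n v))) from rfl]
      rw [if_neg hne, hdil]
      have hE : pvExpand m n mask (f + 1 + 1) mk front v =
          pvExpand m n mask (f + 1) (PySem.Set.union mk front) S v' := by
        rw [pvExpand, if_neg hfr]
      rw [hE]
      apply ih (PySem.Set.union mk front) S v' hin'
      · intro c
        rw [hmemv', hmv, PySem.Set.mem_union]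
      · intro c hcb hc0' hd
        rcases hd with ⟨d, hdm, hdv'⟩
        rcases (hmemv' _).mp hdv' with h | h
        · rcases hstep c hcb hc0' ⟨d, hdm, h⟩ with h2 | ⟨d', hdm', hfm⟩
          · exact Or.inl ((hmemv' c).mpr (Or.inl h2))
          · left
            rw [hv', pvCollect]
            apply collect_cover m n mask front [] v c hcb hc0'
            refine ⟨(c.1 + d'.1, c.2 + d'.2), hfm, (-d'.1, -d'.2), dirs_neg d' hdm', ?_⟩
            rw [Prod.ext_iff]
            constructor <;> simp
        · exact Or.inr ⟨d, hdm, h⟩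


-- the rebuilding pass over the grid of the marked set is exactly painting the marked set
theorem rebuild_gridOf (mask : List (List Int)) (n : Int) (M : List (Int × Int))
    (hM : ∀ c ∈ M, pvInb (mask.length : Int) n c) :
    (PySem.List.enumerate mask).map (fun p =>
      (PySem.List.enumerate p.2).map (fun q =>
        if (q.1 : Int) < n ∧ pvGetB (pvGridOf (mask.length : Int) n M) p.1 q.1 then (1 : Int) else q.2)) =
    pvMarkAll mask M := by
  apply List.ext_getElem
  · simp [length_markAll, PySem.List.length_enumerate]
  · intro k h1 h2
    rw [List.getElem_map, PySem.List.getElem_enumerate]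
    have hk : k < mask.length := by
      simpa [PySem.List.length_enumerate] using h1
    have hk2 : k < (pvMarkAll mask M).length := by rwa [length_markAll]
    apply List.ext_getElem
    · simp [PySem.List.length_enumerate]
      have := rowlen_markAll mask M k
      rw [List.getD_eq_getElem _ _ hk2, List.getD_eq_getElem _ _ hk] at this
      omega
    · intro j hj1 hj2
      rw [List.getElem_map, PySem.List.getElem_enumerate]
      have hjm : j < mask[k].length := by
        simpa [PySem.List.length_enumerate] using hj1
      have hmark : (pvMarkAll mask M)[k][j] = pvGetN (pvMarkAll mask M) k j := by
        unfold pvGetN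
        rw [List.getD_eq_getElem _ _ hk2, List.getD_eq_getElem _ _ hj2]
      have hjD : j < (mask.getD k []).length := by
        rw [List.getD_eq_getElem _ _ hk]; exact hjm
      rw [hmark, getN_markAll mask M k j hk hjD]
      have hcond : ((0 + (j : Int)) < n ∧
          pvGetB (pvGridOf (mask.length : Int) n M) (0 + (k : Int)) (0 + (j : Int))) ↔
          (((k : Int)), ((j : Int))) ∈ M := by
        constructor
        · rintro ⟨hjn, hB⟩
          rw [getB_gridOf _ n M _ _ (by omega) (by exact_mod_cast by omega) (by omega) (by omega)] at hB
          have := of_decide_eq_true hB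
          simpa using this
        · intro hm
          have hb := hM _ hm
          refine ⟨by simpa using hb.2.2.2, ?_⟩
          rw [getB_gridOf _ n M _ _ (by omega) (by simpa using hb.2.1) (by omega) (by simpa using hb.2.2.2)]
          apply decide_eq_true
          simpa using hm
      by_cases hmem : (((k : Int)), ((j : Int))) ∈ M
      · rw [if_pos (hcond.mpr hmem), if_pos hmem]
      · rw [if_neg (fun h => hmem (hcond.mp h)), if_neg hmem]
        unfold pvGetN
        rw [List.getD_eq_getElem _ _ hk, List.getD_eq_getElem _ _ hjm]

-- ===== VERDICT (by name: the statement is the Claim_ definition above) =====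
theorem thicken_spec : Claim_equal_thicken := by
  intro mask boundary thickness hdom hpre
  obtain ⟨hne, hcase⟩ := hpre
  unfold Spec_thicken
  simp only [thicken, thicken_alt]
  set m : Int := (mask.length : Int) with hmdef
  set n : Int := ((PySem.List.pyGetD mask 0 []).length : Int) with hndef
  by_cases ht : 0 < thickness
  · -- the loop runs: fuel = (thickness-1).toNat + 1 marking rounds on A's side
    have hfuel : thickness.toNat = (thickness - 1).toNat + 1 := by omega
    set f : Nat := (thickness - 1).toNat with hfdef
    -- invariants about the boundary
    have hbin : ∀ c ∈ boundary, pvInb m n c := by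
      intro c hc
      rcases hcase with hb | ht' | ⟨hrect0, hnd, hbnd⟩
      · subst hb; simp at hc
      · omega
      · have hn' : PySem.List.pyGetD mask 0 ([] : List Int) = mask.headD [] := by
          cases mask with
          | nil => exact absurd rfl hne
          | cons a t => simp [PySem.List.pyGetD]
        have := hbnd c hc
        exact ⟨this.1, this.2.1, this.2.2.1, by rw [hndef, hn']; exact this.2.2.2⟩
    -- A's side: the BFS paints the expansion's marked set
    set M : List (Int × Int) := pvExpand m n mask (f + 1) [] boundary boundary with hMdef
    have hA : pvLoopA m n thickness.toNat (mask, boundary, boundary) = pvMarkAll mask M := by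
      rcases hcase with hb | ht' | ⟨hrect0, hnd, hbnd⟩
      · subst hb
        rw [loopA_nil_q, hMdef, expand_nil]
        rfl
      · omega
      · have hn' : PySem.List.pyGetD mask 0 ([] : List Int) = mask.headD [] := by
          cases mask with
          | nil => exact absurd rfl hne
          | cons a t => simp [PySem.List.pyGetD]
        have hrect : ∀ row ∈ mask, n ≤ (row.length : Int) := by
          intro row hrow
          rw [hndef, hn']
          exact_mod_cast hrect0 row hrow
        have h := pvLoop_eq mask m n rfl hrect thickness.toNat [] boundary boundary
          (by simp) (fun x hx => hx) hnd (by simp)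
        rw [show pvMarkAll mask [] = mask from rfl] at h
        rw [h, hfuel]
    -- B's side: the dilation iterates carry exactly the expansion's visited set
    have hinit : boundary.foldl (fun R c => pvSetB R c.1 c.2) (pvZeros m n) = pvGridOf m n boundary := by
      rw [zeros_eq_gridOf, foldSetB_gridOf m n boundary []]
      simp
    have hgrid : pvLoopD mask m n f (pvGridOf m n boundary) = pvGridOf m n M := by
      apply expand_grid mask m n f [] boundary boundary hbin
      · intro c; simp
      · intro c _ _ hd
        exact Or.inr hd
    have hMin : ∀ c ∈ M, pvInb m n c :=
      expand_inb m n mask (f + 1) [] boundary boundary (by simp) hbin hbin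
    by_cases hbe : boundary = []
    · subst hbe
      rw [if_neg (by intro h; exact h.2 rfl), hA, hMdef, expand_nil, zeros_eq_gridOf]
      exact (rebuild_gridOf mask n [] (by simp)).symm
    · rw [hA, if_pos ⟨ht, hbe⟩, hinit, hgrid]
      exact (rebuild_gridOf mask n M hMin).symm
  · -- thickness ≤ 0: A's while loop never runs, B's R stays all-False
    have h0 : thickness.toNat = 0 := by omega
    rw [h0, if_neg (by intro h; exact ht h.1)]
    rw [show pvLoopA m n 0 (mask, boundary, boundary) = mask from rfl]
    rw [zeros_eq_gridOf]
    exact (rebuild_gridOf mask n [] (by simp)).symm
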